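-- pv_equiv track=rewrite | github.com/oleremidahl/Togbane | Brukerhistorie_D.py | start_og_slutt_nummer
-- ===== SOURCE A (Python) =====
-- def start_og_slutt_nummer(list, start_stasjon, ende_stasjon):
--         start_nummer = -1
--         slutt_nummer = -1
--         for el in list: # Går gjennom alle stasjonene i en rute
--                 if (el[0] == start_stasjon): # Setter så nummeret til å være lik,
--                         start_nummer = el[2] # nummeret som er definert i stasjonen.
--                 if (el[0] == ende_stasjon):
--                         slutt_nummer = el[2]
--         return start_nummer, slutt_nummer
-- ===== SOURCE B (Python) =====
-- def start_og_slutt_nummer(list, start_stasjon, ende_stasjon):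
--     start_nummer = next((el[2] for el in reversed(list) if el[0] == start_stasjon), -1)
--     slutt_nummer = next((el[2] for el in reversed(list) if el[0] == ende_stasjon), -1)
--     return start_nummer, slutt_nummer
-- ===== Notes on version B (the rewrite author's own statement) =====
-- stated objective: idiomatic
-- what changed: Replaces the single forward loop keeping the last match in two accumulators with two independent reversed short-circuiting searches (next over reversed(list)), each stopping at the first match from the end.
import Mathlib
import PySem

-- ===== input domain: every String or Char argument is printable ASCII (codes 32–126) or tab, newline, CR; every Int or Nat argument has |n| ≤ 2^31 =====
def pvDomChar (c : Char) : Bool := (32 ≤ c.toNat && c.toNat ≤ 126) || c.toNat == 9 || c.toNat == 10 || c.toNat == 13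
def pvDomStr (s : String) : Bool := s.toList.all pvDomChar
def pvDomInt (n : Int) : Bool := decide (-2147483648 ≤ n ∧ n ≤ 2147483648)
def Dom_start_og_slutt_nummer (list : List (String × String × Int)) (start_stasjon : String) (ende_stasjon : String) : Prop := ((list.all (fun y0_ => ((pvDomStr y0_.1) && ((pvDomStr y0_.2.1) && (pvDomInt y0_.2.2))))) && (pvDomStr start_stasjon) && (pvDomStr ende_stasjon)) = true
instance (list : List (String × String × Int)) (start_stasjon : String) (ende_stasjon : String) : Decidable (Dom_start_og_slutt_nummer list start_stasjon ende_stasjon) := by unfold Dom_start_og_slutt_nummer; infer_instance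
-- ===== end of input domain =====

-- B: two reversed short-circuiting searches (last forward match = first reversed match) instead of one forward two-accumulator pass; idiomatic, same cost.


-- ===== PORT A =====
-- Port of A: one forward pass, two accumulators, last match wins.
def start_og_slutt_nummer (list : List (String × String × Int)) (start_stasjon : String) (ende_stasjon : String) : Int × Int :=
  list.foldl
    (fun acc el =>
      (if el.1 == start_stasjon then el.2.2 else acc.1,
       if el.1 == ende_stasjon then el.2.2 else acc.2))
    (-1, -1)

-- ===== PORT B =====
-- B helper: next((el[2] for el in reversed(list) if el[0] == st), -1)
def revSearch (list : List (String × String × Int)) (st : String) : Int :=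
  match list.reverse.find? (fun el => el.1 == st) with
  | some el => el.2.2
  | none => -1

-- Port of B: two independent reversed short-circuiting searches.
def start_og_slutt_nummer_alt (list : List (String × String × Int)) (start_stasjon : String) (ende_stasjon : String) : Int × Int :=
  (revSearch list start_stasjon, revSearch list ende_stasjon)

-- ===== PRECONDITION & SPEC =====
def Spec_start_og_slutt_nummer (list : List (String × String × Int)) (start_stasjon : String) (ende_stasjon : String) (out : Int × Int) : Prop := out = start_og_slutt_nummer_alt list start_stasjon ende_stasjon
instance (list : List (String × String × Int)) (start_stasjon : String) (ende_stasjon : String) (out : Int × Int) : Decidable (Spec_start_og_slutt_nummer list start_stasjon ende_stasjon out) := by unfold Spec_start_og_slutt_nummer; infer_instance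

-- ===== CLAIM (what is proved, stated in full; the proofs are below) =====
def Claim_equal_start_og_slutt_nummer : Prop := ∀ (list : List (String × String × Int)) (start_stasjon : String) (ende_stasjon : String), Dom_start_og_slutt_nummer list start_stasjon ende_stasjon → Spec_start_og_slutt_nummer list start_stasjon ende_stasjon (start_og_slutt_nummer list start_stasjon ende_stasjon)

-- ===== LEMMAS AND PROOFS =====

-- revSearch on a cons absorbs the head into the default accumulator of a last-match fold.
theorem revSearch_cons (x : String × String × Int) (l : List (String × String × Int)) (st : String) (a : Int) :
    (match (x :: l).reverse.find? (fun el => el.1 == st) with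
     | some el => el.2.2
     | none => a) =
    (match l.reverse.find? (fun el => el.1 == st) with
     | some el => el.2.2
     | none => if x.1 == st then x.2.2 else a) := by
  simp only [List.reverse_cons, List.find?_append]
  cases h : l.reverse.find? (fun el => el.1 == st) with
  | some el => simp
  | none =>
    simp only [Option.none_or, List.find?_cons, List.find?_nil]
    by_cases hx : x.1 == st <;> simp [hx]

-- Fold invariant: the forward two-accumulator fold equals the two reversed searches with defaults (a, b).
theorem fold_eq_rev (l : List (String × String × Int)) (s e : String) (a b : Int) :
    l.foldl
      (fun acc el =>
        (if el.1 == s then el.2.2 else acc.1,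
         if el.1 == e then el.2.2 else acc.2))
      (a, b) =
    ((match l.reverse.find? (fun el => el.1 == s) with
      | some el => el.2.2
      | none => a),
     (match l.reverse.find? (fun el => el.1 == e) with
      | some el => el.2.2
      | none => b)) := by
  induction l generalizing a b with
  | nil => simp
  | cons x l ih =>
    simp only [List.foldl_cons, ih, revSearch_cons]

-- ===== VERDICT (by name: the statement is the Claim_ definition above) =====
theorem start_og_slutt_nummer_spec : Claim_equal_start_og_slutt_nummer := by
  intro l s e _
  show _ = _
  unfold start_og_slutt_nummer start_og_slutt_nummer_alt revSearch
  exact fold_eq_rev l s e (-1) (-1)
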